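-- pv_equiv track=rewrite | github.com/NicoKNL/coding-problems | problems/kattis/prettygoodcuberoot/sol.py | get_lower_and_upper_bound
-- ===== SOURCE A (Python) =====
-- def get_lower_and_upper_bound(n):
--     i = 1
--     while pow(i, 3) < n:
--         i *= 2
--
--     if pow(i, 3) == n:
--         return (i, i)
--
--     lower = i // 2
--     upper = i
--
--     return (lower, upper)
-- ===== SOURCE B (Python) =====
-- def get_lower_and_upper_bound(n):
--     if n <= 1:
--         i = 1
--     else:
--         m = (n - 1).bit_length()
--         i = 1 << ((m + 2) // 3)
--     if i ** 3 == n: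
--         return (i, i)
--     return (i // 2, i)
-- ===== Notes on version B (the rewrite author's own statement) =====
-- stated objective: simpler
-- what changed: Replaced the doubling while-loop with a closed-form computation: the exponent of the bounding power of two is obtained from the bit length of the predecessor of n by a ceiling division, with a guard for small and non-positive n where the loop never runs.
import Mathlib
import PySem

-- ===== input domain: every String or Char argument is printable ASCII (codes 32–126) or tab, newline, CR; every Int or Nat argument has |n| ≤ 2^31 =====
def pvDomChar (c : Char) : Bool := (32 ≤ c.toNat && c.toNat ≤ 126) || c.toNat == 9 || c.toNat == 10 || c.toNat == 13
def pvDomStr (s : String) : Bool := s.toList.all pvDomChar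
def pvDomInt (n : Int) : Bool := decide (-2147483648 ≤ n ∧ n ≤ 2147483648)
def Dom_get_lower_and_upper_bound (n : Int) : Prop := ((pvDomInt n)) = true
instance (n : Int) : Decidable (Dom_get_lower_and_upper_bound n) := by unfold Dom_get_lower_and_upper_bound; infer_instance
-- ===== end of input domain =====

-- B replaces A's doubling loop by a closed-form bit-length computation of the same
-- power-of-two bound (objective: simpler, no loop).

-- ===== PORT A =====
-- the while loop `while pow(i,3) < n: i *= 2`; fuel only makes it total in Lean,
-- 64 steps are never exhausted on the domain |n| ≤ 2^31.
def pvLoopA : Nat → Int → Int → Int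
  | 0, i, _ => i
  | fuel + 1, i, n => if i ^ 3 < n then pvLoopA fuel (2 * i) n else i

def get_lower_and_upper_bound (n : Int) : Int × Int :=
  let i := pvLoopA 64 1 n
  if i ^ 3 = n then (i, i)
  else (PySem.Int.floordiv i 2, i)

-- ===== PORT B =====
def get_lower_and_upper_bound_alt (n : Int) : Int × Int :=
  let i : Int :=
    if n ≤ 1 then 1
    else
      -- (n-1).bit_length(): n-1 ≥ 1 here, and Python's bit_length is Nat.size of the absolute value
      let m : Nat := (n - 1).natAbs.size
      -- 1 << ((m + 2) // 3)
      2 ^ ((m + 2) / 3)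
  if i ^ 3 = n then (i, i)
  else (PySem.Int.floordiv i 2, i)

-- ===== PRECONDITION & SPEC =====
def Spec_get_lower_and_upper_bound (n : Int) (out : Int × Int) : Prop := out = get_lower_and_upper_bound_alt n
instance (n : Int) (out : Int × Int) : Decidable (Spec_get_lower_and_upper_bound n out) := by unfold Spec_get_lower_and_upper_bound; infer_instance

-- ===== CLAIM (what is proved, stated in full; the proofs are below) =====
def Claim_equal_get_lower_and_upper_bound : Prop := ∀ (n : Int), Dom_get_lower_and_upper_bound n → Spec_get_lower_and_upper_bound n (get_lower_and_upper_bound n)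

-- ===== LEMMAS AND PROOFS =====

-- the loop, started at 2^j, stops at 2^k, where k is the least exponent with 2^(3k) ≥ n
lemma pvLoopA_eq (n : Int) (k : Nat) (hk : n ≤ 2 ^ (3 * k))
    (hlow : ∀ l, l < k → (2 : Int) ^ (3 * l) < n) :
    ∀ fuel j, j ≤ k → k - j < fuel → pvLoopA fuel ((2 : Int) ^ j) n = 2 ^ k := by
  intro fuel
  induction fuel with
  | zero => intro j _ h; omega
  | succ f ih =>
    intro j hjk hf
    rcases eq_or_lt_of_le hjk with rfl | hlt
    · have hnot : ¬ (((2 : Int) ^ j) ^ 3 < n) := by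
        rw [← pow_mul, Nat.mul_comm]
        exact not_lt.mpr hk
      simp only [pvLoopA]
      rw [if_neg hnot]
    · have hcond : ((2 : Int) ^ j) ^ 3 < n := by
        rw [← pow_mul]
        calc (2 : Int) ^ (j * 3) ≤ 2 ^ (3 * (k - 1)) := by
              apply pow_le_pow_right₀ (by norm_num); omega
          _ < n := hlow (k - 1) (by omega)
      have hstep : (2 : Int) * 2 ^ j = 2 ^ (j + 1) := by ring
      simp only [pvLoopA, hstep]
      rw [if_pos hcond]
      exact ih (j + 1) (by omega) (by omega)

-- ===== VERDICT (by name: the statement is the Claim_ definition above) =====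
theorem get_lower_and_upper_bound_spec : Claim_equal_get_lower_and_upper_bound := by
  intro n hdom
  unfold Spec_get_lower_and_upper_bound
  have hdom' : -2147483648 ≤ n ∧ n ≤ 2147483648 := by
    simpa [Dom_get_lower_and_upper_bound, pvDomInt] using hdom
  unfold get_lower_and_upper_bound get_lower_and_upper_bound_alt
  by_cases hle : n ≤ 1
  · -- loop never runs: 1^3 < n is false
    have h1 : pvLoopA 64 1 n = 1 := by
      simp [pvLoopA]; omega
    simp [h1, hle]
  · -- n ≥ 2
    push_neg at hle
    set x : Nat := (n - 1).natAbs with hx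
    have hxn : (x : Int) = n - 1 := by
      rw [hx, Int.natAbs_of_nonneg (by omega)]
    have hx1 : 1 ≤ x := by omega
    set m : Nat := x.size with hm
    have hm1 : 1 ≤ m := by
      rw [hm]; exact Nat.lt_size.mpr (by simpa using hx1)
    have hub : x < 2 ^ m := by rw [hm]; exact Nat.lt_size_self x
    have hlb : 2 ^ (m - 1) ≤ x := Nat.lt_size.mp (by omega)
    -- bounds on n as integers
    have hubI : n ≤ 2 ^ m := by
      have := (Nat.cast_lt (α := Int)).mpr hub
      rw [hxn] at this; push_cast at this; omega
    have hlbI : (2 : Int) ^ (m - 1) < n := by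
      have := (Nat.cast_le (α := Int)).mpr hlb
      rw [hxn] at this; push_cast at this; omega
    set k : Nat := (m + 2) / 3 with hk
    have h3k : m ≤ 3 * k ∧ 3 * k ≤ m + 2 := by constructor <;> omega
    have hupper : n ≤ 2 ^ (3 * k) :=
      le_trans hubI (pow_le_pow_right₀ (by norm_num) h3k.1)
    have hlower : ∀ l, l < k → (2 : Int) ^ (3 * l) < n := by
      intro l hl
      calc (2 : Int) ^ (3 * l) ≤ 2 ^ (m - 1) :=
            pow_le_pow_right₀ (by norm_num) (by omega)
        _ < n := hlbI
    have hloop : pvLoopA 64 1 n = 2 ^ k := by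
      have hmsz : m ≤ 31 := by
        rw [hm]; exact Nat.size_le.mpr (by
          have hxi : (x : Int) < 2 ^ 31 := by rw [hxn]; omega
          exact_mod_cast hxi)
      have h := pvLoopA_eq n k hupper hlower 64 0 (by omega) (by omega)
      simpa using h
    rw [hloop]
    have hn1 : ¬ n ≤ 1 := by omega
    simp only [if_neg hn1, ← hk]
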